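-- pv_equiv track=rewrite | github.com/paiml/depyler | examples/hard_wave3_041.py | bfs_path_exists
-- ===== SOURCE A (Python) =====
-- from typing import Dict, List, Tuple
--
-- def bfs_path_exists(adj: Dict[int, List[int]], start: int, end: int) -> bool:
--     """Check if path exists from start to end."""
--     if start == end:
--         return True
--     visited: Dict[int, int] = {}
--     visited[start] = 1
--     queue: List[int] = [start]
--     head: int = 0
--     while head < len(queue):
--         node: int = queue[head]
--         head += 1
--         if node in adj:
--             for nb in adj[node]:
--                 if nb == end:
--                     return True
--                 if nb not in visited:
--                     visited[nb] = 1
--                     queue.append(nb)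
--     return False
-- ===== SOURCE B (Python) =====
-- def bfs_path_exists(adj, start, end):
--     """Fixpoint saturation: grow the reachable set by whole passes over the
--     adjacency dict until nothing changes, then test whether end is a
--     neighbour of any reachable node."""
--     if start == end:
--         return True
--     reach = {start}
--     changed = True
--     while changed:
--         changed = False
--         for node, nbs in adj.items():
--             if node in reach:
--                 for nb in nbs:
--                     if nb not in reach:
--                         reach.add(nb)
--                         changed = True
--     return any(node in reach and end in nbs for node, nbs in adj.items())
-- ===== Notes on version B (the rewrite author's own statement) =====
-- stated objective: alternative
-- what changed: Replaces the FIFO queue-with-head-pointer BFS by a worklist-free fixpoint saturation: the reachable set is grown by repeated whole passes over the adjacency dict until a pass adds nothing, and the answer is then read off by checking whether end is a neighbour of any reachable node.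
import Mathlib
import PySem

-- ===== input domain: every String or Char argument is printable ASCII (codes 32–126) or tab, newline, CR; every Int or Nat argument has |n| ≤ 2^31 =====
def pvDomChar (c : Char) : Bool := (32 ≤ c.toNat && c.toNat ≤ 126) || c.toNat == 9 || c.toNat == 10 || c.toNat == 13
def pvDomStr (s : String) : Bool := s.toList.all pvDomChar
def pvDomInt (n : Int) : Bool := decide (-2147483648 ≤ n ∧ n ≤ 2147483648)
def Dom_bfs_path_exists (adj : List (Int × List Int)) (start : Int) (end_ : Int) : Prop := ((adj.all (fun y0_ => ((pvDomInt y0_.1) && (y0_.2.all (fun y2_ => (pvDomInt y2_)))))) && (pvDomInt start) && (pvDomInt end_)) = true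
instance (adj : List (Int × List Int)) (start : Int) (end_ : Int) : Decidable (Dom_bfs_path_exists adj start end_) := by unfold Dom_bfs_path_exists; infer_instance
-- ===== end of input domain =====

-- B replaces A's FIFO queue+head BFS by a worklist-free fixpoint saturation: the reachable set is
-- grown by whole passes over the adjacency dict until a pass adds nothing, then the answer is read off.

-- ===== PORT A =====
-- fuel bound for A's loop port: the number of worklist pops never exceeds
-- 1 (for start) + total number of neighbour entries, so this fuel is never exhausted
def pvFuelBound (adj : List (Int × List Int)) : Nat :=
  adj.foldl (fun a p => a + p.2.length) 0 + 2

-- A's inner 'for nb in adj[node]' loop: 'none' = the Python 'return True' was taken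
def pvBfsScan (end_ : Int) : List Int → PySem.Dict Int Int → List Int →
    Option (PySem.Dict Int Int × List Int)
  | [], visited, queue => some (visited, queue)
  | nb :: rest, visited, queue =>
    if nb == end_ then none
    else if visited.contains nb = false then
      pvBfsScan end_ rest (visited.insert nb 1) (queue ++ [nb])
    else
      pvBfsScan end_ rest visited queue

-- A's 'while head < len(queue)' loop (fuel only makes the recursion structural)
def pvBfsLoop (adjd : PySem.Dict Int (List Int)) (end_ : Int) :
    Nat → PySem.Dict Int Int → List Int → Int → Bool
  | 0, _, _, _ => false
  | fuel + 1, visited, queue, head =>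
    if head < (queue.length : Int) then
      -- node = queue[head]; head += 1; if node in adj: for nb in adj[node]: …
      match adjd.get? (PySem.List.pyGetD queue head 0) with
      | some nbs =>
        match pvBfsScan end_ nbs visited queue with
        | none => true
        | some (v', q') => pvBfsLoop adjd end_ fuel v' q' (head + 1)
      | none => pvBfsLoop adjd end_ fuel visited queue (head + 1)
    else false

def bfs_path_exists (adj : List (Int × List Int)) (start : Int) (end_ : Int) : Bool :=
  if start == end_ then true
  else
    pvBfsLoop (PySem.Dict.mk adj) end_ (pvFuelBound adj)
      (PySem.Dict.insert PySem.Dict.empty start 1) [start] 0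

-- ===== PORT B =====
-- Python's adj.items() iterates the dict's unique keys in first-occurrence order with their
-- first bindings (the convention for List-encoded dicts): exactly dedup of the key column,
-- with the value read back by first-match getD.
def pvKeysB (adj : List (Int × List Int)) : List Int :=
  PySem.List.dedup (adj.map Prod.fst)

-- B's inner 'for nb in nbs: if nb not in reach: reach.add(nb); changed = True'
def pvGrow : List Int → PySem.Set Int → Bool → PySem.Set Int × Bool
  | [], reach, changed => (reach, changed)
  | nb :: rest, reach, changed =>
    if PySem.Set.contains reach nb = false then
      pvGrow rest (PySem.Set.add reach nb) true
    else
      pvGrow rest reach changed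

-- one pass 'for node, nbs in adj.items(): if node in reach: …'
def pvPass (d : PySem.Dict Int (List Int)) :
    List Int → PySem.Set Int → Bool → PySem.Set Int × Bool
  | [], reach, changed => (reach, changed)
  | k :: ks, reach, changed =>
    if PySem.Set.contains reach k then
      match pvGrow (d.getD k []) reach changed with
      | (reach', changed') => pvPass d ks reach' changed'
    else pvPass d ks reach changed

-- B's 'while changed:' loop (fuel only makes the recursion structural; each continuing
-- pass strictly grows reach inside a finite universe, so the fuel below never runs out)
def pvSaturate (d : PySem.Dict Int (List Int)) (ks : List Int) :
    Nat → PySem.Set Int → PySem.Set Int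
  | 0, reach => reach
  | fuel + 1, reach =>
    match pvPass d ks reach false with
    | (reach', changed) => if changed then pvSaturate d ks fuel reach' else reach'

-- 'any(node in reach and end in nbs for node, nbs in adj.items())'
def pvAnyEnd (d : PySem.Dict Int (List Int)) (e_ : Int) (reach : PySem.Set Int) :
    List Int → Bool
  | [] => false
  | k :: ks =>
    if PySem.Set.contains reach k && (d.getD k []).contains e_ then true
    else pvAnyEnd d e_ reach ks

def pvFuelB (adj : List (Int × List Int)) : Nat :=
  (adj.flatMap (fun p => p.2)).length + 2

def bfs_path_exists_alt (adj : List (Int × List Int)) (start : Int) (end_ : Int) : Bool :=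
  if start == end_ then true
  else
    pvAnyEnd (PySem.Dict.mk adj) end_
      (pvSaturate (PySem.Dict.mk adj) (pvKeysB adj) (pvFuelB adj) (PySem.Set.ofList [start]))
      (pvKeysB adj)

-- ===== PRECONDITION & SPEC =====
def Spec_bfs_path_exists (adj : List (Int × List Int)) (start : Int) (end_ : Int) (out : Bool) : Prop := out = bfs_path_exists_alt adj start end_
instance (adj : List (Int × List Int)) (start : Int) (end_ : Int) (out : Bool) : Decidable (Spec_bfs_path_exists adj start end_ out) := by unfold Spec_bfs_path_exists; infer_instance

-- ===== CLAIM (what is proved, stated in full; the proofs are below) =====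
def Claim_equal_bfs_path_exists : Prop := ∀ (adj : List (Int × List Int)) (start : Int) (end_ : Int), Dom_bfs_path_exists adj start end_ → Spec_bfs_path_exists adj start end_ (bfs_path_exists adj start end_)

-- ===== LEMMAS AND PROOFS =====

-- the neighbour list both programs read for a node (empty when the node is not a key)
def pvNb (d : PySem.Dict Int (List Int)) (a : Int) : List Int := d.getD a []

def pvEdge (d : PySem.Dict Int (List Int)) (a b : Int) : Prop := b ∈ pvNb d a

-- the common characterisation: some node reachable from start has end_ among its neighbours
def pvHit (d : PySem.Dict Int (List Int)) (start e_ : Int) : Prop :=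
  ∃ w, Relation.ReflTransGen (pvEdge d) start w ∧ e_ ∈ pvNb d w

-- every int that can ever be added to a visited/reach structure besides start
def pvU (d : PySem.Dict Int (List Int)) : Finset Int :=
  (d.items.flatMap (fun p => p.2)).toFinset

def pvVsetA (V : PySem.Dict Int Int) : Finset Int := V.keys.toFinset

lemma pv_reach_closed (d : PySem.Dict Int (List Int)) (P : Int → Prop)
    (hcl : ∀ v, P v → ∀ y ∈ pvNb d v, P y) {v w : Int}
    (hv : P v) (h : Relation.ReflTransGen (pvEdge d) v w) : P w := by
  induction h with
  | refl => exact hv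
  | tail _ h₂ ih => exact hcl _ ih _ h₂

lemma pvNb_sub_U (d : PySem.Dict Int (List Int)) (a : Int) :
    ∀ x ∈ pvNb d a, x ∈ pvU d := by
  intro x hx
  unfold pvNb at hx
  cases hget : d.get? a with
  | none => rw [PySem.Dict.getD_of_get?_eq_none _ _ hget] at hx; cases hx
  | some l =>
    rw [PySem.Dict.getD_of_get?_eq_some _ _ hget] at hx
    have : (a, l) ∈ d.items := PySem.Dict.mem_items_of_get?_eq_some _ hget
    exact List.mem_toFinset.mpr (List.mem_flatMap.mpr ⟨(a, l), this, hx⟩)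

lemma pvFuel_ge (adj : List (Int × List Int)) :
    ((PySem.Dict.mk adj).items.flatMap (fun p => p.2)).length + 2 ≤ pvFuelBound adj := by
  have h : ∀ (l : List (Int × List Int)) (acc : Nat),
      l.foldl (fun a p => a + p.2.length) acc = acc + (l.flatMap (fun p => p.2)).length := by
    intro l
    induction l with
    | nil => simp
    | cons p t ih => intro acc; simp [List.foldl_cons, ih, List.flatMap_cons]; omega
  unfold pvFuelBound
  have : (PySem.Dict.mk adj).items = adj := rfl
  rw [this, h adj 0]
  omega

-- ---- A side ----

lemma pvBfsScan_none (e_ : Int) :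
    ∀ (l : List Int) (V : PySem.Dict Int Int) (q : List Int),
      pvBfsScan e_ l V q = none ↔ e_ ∈ l := by
  intro l
  induction l with
  | nil => intro V q; simp [pvBfsScan]
  | cons nb rest ih =>
    intro V q
    by_cases he : nb = e_
    · subst he; simp [pvBfsScan]
    · simp only [pvBfsScan, beq_iff_eq, if_neg he]
      by_cases hc : V.contains nb = false
      · rw [if_pos hc, ih]
        simp [List.mem_cons, Ne.symm he]
      · rw [if_neg hc, ih]
        simp [List.mem_cons, Ne.symm he]

lemma pvBfsScan_some (e_ : Int) :
    ∀ (l : List Int) (V : PySem.Dict Int Int) (q : List Int)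
      (V' : PySem.Dict Int Int) (q' : List Int),
      pvBfsScan e_ l V q = some (V', q') →
      ∃ news : List Int,
        q' = q ++ news ∧
        (∀ x ∈ news, x ∈ l) ∧
        (∀ x, V'.contains x = true ↔ (V.contains x = true ∨ x ∈ news)) ∧
        (∀ x ∈ news, V.contains x = false) ∧
        news.Nodup ∧
        (∀ x ∈ l, V'.contains x = true) ∧
        e_ ∉ l := by
  intro l
  induction l with
  | nil =>
    intro V q V' q' h
    simp only [pvBfsScan, Option.some.injEq, Prod.mk.injEq] at h
    exact ⟨[], by simp [h.2.symm], by simp, by simp [h.1.symm], by simp, by simp, by simp, by simp⟩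
  | cons nb rest ih =>
    intro V q V' q' h
    by_cases he : nb = e_
    · subst he; simp [pvBfsScan] at h
    · simp only [pvBfsScan, beq_iff_eq, if_neg he] at h
      by_cases hc : V.contains nb = false
      · rw [if_pos hc] at h
        obtain ⟨news, hq, hsub, hmem, hfresh, hnd, hall, hne⟩ := ih _ _ _ _ h
        refine ⟨nb :: news, ?_, ?_, ?_, ?_, ?_, ?_, ?_⟩
        · rw [hq]; simp
        · intro x hx
          rcases List.mem_cons.mp hx with h1 | h1
          · simp [h1]
          · exact List.mem_cons_of_mem _ (hsub x h1)
        · intro x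
          rw [hmem x, PySem.Dict.contains_insert]
          constructor
          · rintro (h1 | h1)
            · rcases Bool.or_eq_true_iff.mp h1 with h2 | h2
              · exact Or.inr (by rw [beq_iff_eq.mp h2]; exact List.mem_cons_self ..)
              · exact Or.inl h2
            · exact Or.inr (List.mem_cons_of_mem _ h1)
          · rintro (h1 | h1)
            · exact Or.inl (by simp [h1])
            · rcases List.mem_cons.mp h1 with h2 | h2
              · exact Or.inl (by simp [h2])
              · exact Or.inr h2
        · intro x hx
          rcases List.mem_cons.mp hx with h1 | h1
          · exact h1 ▸ hc
          · have := hfresh x h1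
            rw [PySem.Dict.contains_insert] at this
            rcases Bool.or_eq_false_iff.mp this with ⟨_, h3⟩
            exact h3
        · refine List.nodup_cons.mpr ⟨?_, hnd⟩
          intro hmemnb
          have := hfresh nb hmemnb
          rw [PySem.Dict.contains_insert_self] at this
          cases this
        · intro x hx
          rcases List.mem_cons.mp hx with h1 | h1
          · subst h1; exact (hmem x).mpr (Or.inl (PySem.Dict.contains_insert_self ..))
          · exact hall x h1
        · intro hx
          rcases List.mem_cons.mp hx with h1 | h1
          · exact he h1.symm
          · exact hne h1
      · rw [if_neg hc] at h
        obtain ⟨news, hq, hsub, hmem, hfresh, hnd, hall, hne⟩ := ih _ _ _ _ h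
        have hcc : V.contains nb = true := by
          cases hb : V.contains nb
          · exact absurd hb hc
          · rfl
        refine ⟨news, hq, fun x hx => List.mem_cons_of_mem _ (hsub x hx), hmem,
          hfresh, hnd, ?_, ?_⟩
        · intro x hx
          rcases List.mem_cons.mp hx with h1 | h1
          · exact h1 ▸ (hmem nb).mpr (Or.inl hcc)
          · exact hall x h1
        · intro hx
          rcases List.mem_cons.mp hx with h1 | h1
          · exact he h1.symm
          · exact hne h1

lemma pvBfsLoop_true (d : PySem.Dict Int (List Int)) (e_ : Int) :
    ∀ (fuel : Nat) (V : PySem.Dict Int Int) (queue : List Int) (head : Int),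
      0 ≤ head →
      pvBfsLoop d e_ fuel V queue head = true →
      ∃ v w, v ∈ queue.drop head.toNat ∧ Relation.ReflTransGen (pvEdge d) v w ∧
        e_ ∈ pvNb d w := by
  intro fuel
  induction fuel with
  | zero => intro V queue head _ h; simp [pvBfsLoop] at h
  | succ n ih =>
    intro V queue head h0 h
    rw [pvBfsLoop] at h
    by_cases hlt : head < (queue.length : Int)
    · rw [if_pos hlt] at h
      have hidx : head.toNat < queue.length := by omega
      have hnode : PySem.List.pyGetD queue head 0 = queue[head.toNat] :=
        PySem.List.pyGetD_eq_getElem queue 0 h0 hlt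
      have hdrop : queue.drop head.toNat = queue[head.toNat] :: queue.drop (head.toNat + 1) :=
        List.drop_eq_getElem_cons hidx
      have ht1 : (head + 1).toNat = head.toNat + 1 := by omega
      cases hget : d.get? (PySem.List.pyGetD queue head 0) with
      | some nbs =>
        rw [hget] at h; dsimp only at h
        have hnbs : pvNb d queue[head.toNat] = nbs := by
          unfold pvNb
          rw [← hnode]
          exact PySem.Dict.getD_of_get?_eq_some _ _ hget
        cases hscan : pvBfsScan e_ nbs V queue with
        | none =>
          have he : e_ ∈ nbs := (pvBfsScan_none e_ nbs V queue).mp hscan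
          exact ⟨queue[head.toNat], queue[head.toNat],
            by rw [hdrop]; exact List.mem_cons_self .., Relation.ReflTransGen.refl,
            by rw [hnbs]; exact he⟩
        | some p =>
          obtain ⟨V', q'⟩ := p
          rw [hscan] at h; dsimp only at h
          obtain ⟨news, hq, hsub, _, _, _, _, _⟩ := pvBfsScan_some e_ nbs V queue V' q' hscan
          obtain ⟨v, w, hv, hr, he⟩ := ih V' q' (head + 1) (by omega) h
          rw [ht1, hq, List.drop_append_of_le_length (by omega)] at hv
          rcases List.mem_append.mp hv with h1 | h1
          · exact ⟨v, w, by rw [hdrop]; exact List.mem_cons_of_mem _ h1, hr, he⟩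
          · refine ⟨queue[head.toNat], w, by rw [hdrop]; exact List.mem_cons_self .., ?_, he⟩
            exact Relation.ReflTransGen.head (by rw [pvEdge, hnbs]; exact hsub v h1) hr
      | none =>
        rw [hget] at h; dsimp only at h
        obtain ⟨v, w, hv, hr, he⟩ := ih V queue (head + 1) (by omega) h
        rw [ht1] at hv
        exact ⟨v, w, by rw [hdrop]; exact List.mem_cons_of_mem _ hv, hr, he⟩
    · rw [if_neg hlt] at h; cases h

lemma pvBfsLoop_false (d : PySem.Dict Int (List Int)) (e_ : Int) :
    ∀ (fuel : Nat) (V : PySem.Dict Int Int) (queue : List Int) (head : Int),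
      0 ≤ head → head ≤ (queue.length : Int) →
      (∀ x ∈ queue.drop head.toNat, V.contains x = true) →
      (∀ v, V.contains v = true → v ∉ queue.drop head.toNat →
        ∀ y ∈ pvNb d v, y ≠ e_ ∧ V.contains y = true) →
      (queue.drop head.toNat).length + (pvU d \ pvVsetA V).card < fuel →
      pvBfsLoop d e_ fuel V queue head = false →
      ∀ v, V.contains v = true → ∀ w, Relation.ReflTransGen (pvEdge d) v w →
        e_ ∉ pvNb d w := by
  intro fuel
  induction fuel with
  | zero => intro V queue head _ _ _ _ hfuel; omega
  | succ n ih =>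
    intro V queue head h0 hle hpend hproc hfuel hres
    rw [pvBfsLoop] at hres
    by_cases hlt : head < (queue.length : Int)
    · rw [if_pos hlt] at hres
      have hidx : head.toNat < queue.length := by omega
      have hnode : PySem.List.pyGetD queue head 0 = queue[head.toNat] :=
        PySem.List.pyGetD_eq_getElem queue 0 h0 hlt
      have hdrop : queue.drop head.toNat = queue[head.toNat] :: queue.drop (head.toNat + 1) :=
        List.drop_eq_getElem_cons hidx
      have ht1 : (head + 1).toNat = head.toNat + 1 := by omega
      have hlen : (queue.drop head.toNat).length = queue.length - head.toNat := by
        simp [List.length_drop]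
      cases hget : d.get? (PySem.List.pyGetD queue head 0) with
      | some nbs =>
        rw [hget] at hres; dsimp only at hres
        have hnbs : pvNb d queue[head.toNat] = nbs := by
          unfold pvNb
          rw [← hnode]
          exact PySem.Dict.getD_of_get?_eq_some _ _ hget
        cases hscan : pvBfsScan e_ nbs V queue with
        | none => rw [hscan] at hres; dsimp only at hres; cases hres
        | some p =>
          obtain ⟨V', q'⟩ := p
          rw [hscan] at hres; dsimp only at hres
          obtain ⟨news, hq, hsub, hmem, hfresh, hnd, hall, hne⟩ :=
            pvBfsScan_some e_ nbs V queue V' q' hscan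
          -- next pending list
          have hdrop' : q'.drop (head + 1).toNat = queue.drop (head.toNat + 1) ++ news := by
            rw [ht1, hq, List.drop_append_of_le_length (by omega)]
          -- fuel bookkeeping
          have hNsub : news.toFinset ⊆ pvU d \ pvVsetA V := by
            intro x hx
            have hx' := List.mem_toFinset.mp hx
            refine Finset.mem_sdiff.mpr ⟨pvNb_sub_U d queue[head.toNat] x (by rw [hnbs]; exact hsub x hx'), ?_⟩
            intro hk
            have : V.contains x = true :=
              (PySem.Dict.contains_iff_mem_keys ..).mpr (List.mem_toFinset.mp hk)
            rw [hfresh x hx'] at this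
            cases this
          have hVset : pvVsetA V' = pvVsetA V ∪ news.toFinset := by
            apply Finset.ext
            intro a
            simp only [pvVsetA, Finset.mem_union, List.mem_toFinset]
            rw [← PySem.Dict.contains_iff_mem_keys, ← PySem.Dict.contains_iff_mem_keys, hmem a]
          have hcardN : news.toFinset.card = news.length := List.toFinset_card_of_nodup hnd
          have hcard : (pvU d \ pvVsetA V').card = (pvU d \ pvVsetA V).card - news.length := by
            have h1 : pvU d \ pvVsetA V' = (pvU d \ pvVsetA V) \ news.toFinset := by
              rw [hVset]
              apply Finset.ext
              intro a
              simp only [Finset.mem_sdiff, Finset.mem_union]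
              tauto
            rw [h1, Finset.card_sdiff, Finset.inter_eq_left.mpr hNsub, hcardN]
          have hNle : news.length ≤ (pvU d \ pvVsetA V).card := by
            rw [← hcardN]; exact Finset.card_le_card hNsub
          -- invariants for the recursive call
          have hpend' : ∀ x ∈ q'.drop (head + 1).toNat, V'.contains x = true := by
            intro x hx
            rw [hdrop'] at hx
            rcases List.mem_append.mp hx with h1 | h1
            · exact (hmem x).mpr (Or.inl (hpend x (by rw [hdrop]; exact List.mem_cons_of_mem _ h1)))
            · exact (hmem x).mpr (Or.inr h1)
          have hproc' : ∀ v, V'.contains v = true → v ∉ q'.drop (head + 1).toNat →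
              ∀ y ∈ pvNb d v, y ≠ e_ ∧ V'.contains y = true := by
            intro v hv hnp y hy
            rcases (hmem v).mp hv with h1 | h1
            · by_cases hvp : v ∈ queue.drop head.toNat
              · rw [hdrop] at hvp
                rcases List.mem_cons.mp hvp with h2 | h2
                · subst h2
                  rw [hnbs] at hy
                  exact ⟨fun hye => hne (hye ▸ hy), hall y hy⟩
                · exact absurd (by rw [hdrop']; exact List.mem_append_left _ h2) hnp
              · obtain ⟨hy1, hy2⟩ := hproc v h1 hvp y hy
                exact ⟨hy1, (hmem y).mpr (Or.inl hy2)⟩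
            · exact absurd (by rw [hdrop']; exact List.mem_append_right _ h1) hnp
          have hfuel' : (q'.drop (head + 1).toNat).length + (pvU d \ pvVsetA V').card < n := by
            rw [hdrop', List.length_append, hcard]
            have : (queue.drop (head.toNat + 1)).length = queue.length - (head.toNat + 1) := by
              simp [List.length_drop]
            omega
          have hcl := ih V' q' (head + 1) (by omega) (by rw [hq]; simp; omega)
            hpend' hproc' hfuel' hres
          intro v hv w hr
          exact hcl v ((hmem v).mpr (Or.inl hv)) w hr
      | none =>
        rw [hget] at hres; dsimp only at hres
        have hnbs : pvNb d queue[head.toNat] = [] := by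
          unfold pvNb
          rw [← hnode]
          exact PySem.Dict.getD_of_get?_eq_none _ _ hget
        have hpend' : ∀ x ∈ queue.drop (head + 1).toNat, V.contains x = true := by
          intro x hx
          rw [ht1] at hx
          exact hpend x (by rw [hdrop]; exact List.mem_cons_of_mem _ hx)
        have hproc' : ∀ v, V.contains v = true → v ∉ queue.drop (head + 1).toNat →
            ∀ y ∈ pvNb d v, y ≠ e_ ∧ V.contains y = true := by
          intro v hv hnp y hy
          by_cases hvp : v ∈ queue.drop head.toNat
          · rw [hdrop] at hvp
            rcases List.mem_cons.mp hvp with h2 | h2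
            · subst h2; rw [hnbs] at hy; cases hy
            · exact absurd (by rw [ht1]; exact h2) hnp
          · exact hproc v hv hvp y hy
        have hfuel' : (queue.drop (head + 1).toNat).length + (pvU d \ pvVsetA V).card < n := by
          rw [ht1]
          have h1 : (queue.drop (head.toNat + 1)).length = queue.length - (head.toNat + 1) := by
            simp [List.length_drop]
          have h2 : (queue.drop head.toNat).length = queue.length - head.toNat := by
            simp [List.length_drop]
          omega
        exact ih V queue (head + 1) (by omega) (by omega) hpend' hproc' hfuel' hres
    · rw [if_neg hlt] at hres
      -- the queue is exhausted: the visited set is closed and never saw end_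
      have hempty : queue.drop head.toNat = [] := by
        apply List.drop_eq_nil_of_le
        omega
      intro v hv w hr he
      have hclosed : ∀ u, V.contains u = true → ∀ y ∈ pvNb d u, V.contains y = true := by
        intro u hu y hy
        exact (hproc u hu (by rw [hempty]; exact List.not_mem_nil) y hy).2
      have hw : V.contains w = true :=
        pv_reach_closed d (fun x => V.contains x = true) hclosed hv hr
      exact (hproc w hw (by rw [hempty]; exact List.not_mem_nil) e_ he).1 rfl

lemma pvA_iff (adj : List (Int × List Int)) (start e_ : Int) :
    bfs_path_exists adj start e_ = true ↔
      (start = e_ ∨ pvHit (PySem.Dict.mk adj) start e_) := by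
  unfold bfs_path_exists
  by_cases hse : start = e_
  · simp [hse]
  · rw [if_neg (by simpa using hse)]
    constructor
    · intro h
      obtain ⟨v, w, hv, hr, he⟩ := pvBfsLoop_true (PySem.Dict.mk adj) e_ _ _ _ _ (by omega) h
      simp at hv
      exact Or.inr ⟨w, hv ▸ hr, he⟩
    · rintro (h | ⟨w, hr, he⟩)
      · exact absurd h hse
      · by_contra hres
        have hres' : pvBfsLoop (PySem.Dict.mk adj) e_ (pvFuelBound adj)
            (PySem.Dict.insert PySem.Dict.empty start 1) [start] 0 = false := by
          cases hb : pvBfsLoop (PySem.Dict.mk adj) e_ (pvFuelBound adj)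
              (PySem.Dict.insert PySem.Dict.empty start 1) [start] 0
          · rfl
          · exact absurd hb hres
        have honly : ∀ v, (PySem.Dict.insert PySem.Dict.empty start 1).contains v = true →
            v = start := by
          intro v hv
          rw [PySem.Dict.contains_insert] at hv
          rcases Bool.or_eq_true_iff.mp hv with h1 | h1
          · exact beq_iff_eq.mp h1
          · rw [PySem.Dict.contains_empty] at h1; cases h1
        have hfuel : ([start].drop (0 : Int).toNat).length +
            (pvU (PySem.Dict.mk adj) \ pvVsetA (PySem.Dict.insert PySem.Dict.empty start 1)).card <
            pvFuelBound adj := by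
          have h1 := pvFuel_ge adj
          have h2 : (pvU (PySem.Dict.mk adj) \ pvVsetA (PySem.Dict.insert PySem.Dict.empty start 1)).card ≤
              ((PySem.Dict.mk adj).items.flatMap (fun p => p.2)).length := by
            calc _ ≤ (pvU (PySem.Dict.mk adj)).card := Finset.card_le_card (Finset.sdiff_subset)
              _ ≤ _ := List.toFinset_card_le _
          simp only [Int.toNat_zero, List.drop_zero, List.length_cons, List.length_nil]
          omega
        have := pvBfsLoop_false (PySem.Dict.mk adj) e_ (pvFuelBound adj)
          (PySem.Dict.insert PySem.Dict.empty start 1) [start] 0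
          (by omega) (by simp)
          (by intro x hx; simp at hx; subst hx; exact PySem.Dict.contains_insert_self ..)
          (by
            intro v hv hnp
            exact absurd (by simp [honly v hv]) hnp)
          hfuel hres' start (PySem.Dict.contains_insert_self ..) w hr
        exact this he

-- ---- B side ----

lemma pvGrow_spec :
    ∀ (l : List Int) (R : PySem.Set Int) (ch : Bool) (R' : PySem.Set Int) (ch' : Bool),
      pvGrow l R ch = (R', ch') →
      ∃ news : List Int,
        R' = R ++ news ∧
        (∀ x ∈ news, x ∈ l ∧ x ∉ R) ∧
        (∀ x ∈ l, x ∈ R') ∧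
        ch' = (ch || !news.isEmpty) := by
  intro l
  induction l with
  | nil =>
    intro R ch R' ch' h
    simp only [pvGrow, Prod.mk.injEq] at h
    exact ⟨[], by simp [h.1.symm], by simp, by simp, by simp [h.2.symm]⟩
  | cons nb rest ih =>
    intro R ch R' ch' h
    simp only [pvGrow] at h
    by_cases hc : PySem.Set.contains R nb = false
    · rw [if_pos hc] at h
      have hnb : nb ∉ R := fun hm => by
        rw [(PySem.Set.contains_iff R nb).mpr hm] at hc; cases hc
      obtain ⟨news, hR, hfresh, hall, hch⟩ := ih _ _ _ _ h
      rw [PySem.Set.add_of_not_mem hnb] at hR hfresh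
      refine ⟨nb :: news, by rw [hR]; simp, ?_, ?_, by simp [hch]⟩
      · intro x hx
        rcases List.mem_cons.mp hx with h1 | h1
        · exact ⟨h1 ▸ List.mem_cons_self .., h1 ▸ hnb⟩
        · obtain ⟨hx1, hx2⟩ := hfresh x h1
          exact ⟨List.mem_cons_of_mem _ hx1, fun hm => hx2 (List.mem_append_left _ hm)⟩
      · intro x hx
        rcases List.mem_cons.mp hx with h1 | h1
        · subst h1
          rw [hR]
          exact List.mem_append_left _ (List.mem_append_right _ (List.mem_cons_self ..))
        · exact hall x h1
    · rw [if_neg hc] at h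
      have hnb : nb ∈ R := by
        cases hb : PySem.Set.contains R nb
        · exact absurd hb hc
        · exact (PySem.Set.contains_iff R nb).mp hb
      obtain ⟨news, hR, hfresh, hall, hch⟩ := ih _ _ _ _ h
      refine ⟨news, hR, ?_, ?_, hch⟩
      · intro x hx
        obtain ⟨hx1, hx2⟩ := hfresh x hx
        exact ⟨List.mem_cons_of_mem _ hx1, hx2⟩
      · intro x hx
        rcases List.mem_cons.mp hx with h1 | h1
        · exact h1 ▸ (by rw [hR]; exact List.mem_append_left _ hnb)
        · exact hall x h1

lemma pvPass_spec (d : PySem.Dict Int (List Int)) :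
    ∀ (ks : List Int) (R : PySem.Set Int) (ch : Bool) (R' : PySem.Set Int) (ch' : Bool),
      pvPass d ks R ch = (R', ch') →
      ∃ news : List Int,
        R' = R ++ news ∧
        (∀ x ∈ news, x ∈ pvU d ∧ x ∉ R) ∧
        (ch' = false → news = [] ∧ ch = false ∧
          ∀ k ∈ ks, k ∈ R → ∀ y ∈ pvNb d k, y ∈ R) ∧
        (ch = false → ch' = true → news ≠ []) := by
  intro ks
  induction ks with
  | nil =>
    intro R ch R' ch' h
    simp only [pvPass, Prod.mk.injEq] at h
    obtain ⟨hR, hc⟩ := h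
    subst hR; subst hc
    refine ⟨[], by simp, by simp, ?_, ?_⟩
    · intro hch
      exact ⟨rfl, hch, by simp⟩
    · intro h1 h2
      rw [h1] at h2; cases h2
  | cons k ks ih =>
    intro R ch R' ch' h
    simp only [pvPass] at h
    by_cases hk : PySem.Set.contains R k = true
    · rw [if_pos hk] at h
      have hkR : k ∈ R := (PySem.Set.contains_iff R k).mp hk
      cases hgrow : pvGrow (d.getD k []) R ch with
      | mk R1 ch1 =>
        rw [hgrow] at h; dsimp only at h
        obtain ⟨n1, hR1, hf1, hall1, hch1⟩ := pvGrow_spec _ _ _ _ _ hgrow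
        obtain ⟨n2, hR2, hf2, hfix, hstr⟩ := ih _ _ _ _ h
        refine ⟨n1 ++ n2, by rw [hR2, hR1, List.append_assoc], ?_, ?_, ?_⟩
        · intro x hx
          rcases List.mem_append.mp hx with h1 | h1
          · obtain ⟨hx1, hx2⟩ := hf1 x h1
            exact ⟨pvNb_sub_U d k x hx1, hx2⟩
          · obtain ⟨hx1, hx2⟩ := hf2 x h1
            exact ⟨hx1, fun hm => hx2 (by rw [hR1]; exact List.mem_append_left _ hm)⟩
        · intro hch'
          obtain ⟨hn2, hch1f, hcl2⟩ := hfix hch'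
          have hn1 : n1 = [] := by
            rw [hch1f] at hch1
            cases hn : n1.isEmpty
            · rw [hn] at hch1; simp at hch1
            · exact List.isEmpty_iff.mp hn
          have hR1R : R1 = R := by rw [hR1, hn1, List.append_nil]
          refine ⟨by rw [hn1, hn2]; rfl, ?_, ?_⟩
          · have := hch1
            rw [hch1f, hn1] at this
            simpa using this
          · intro k' hk' hk'R y hy
            rcases List.mem_cons.mp hk' with h1 | h1
            · subst h1
              exact hR1R ▸ hall1 y hy
            · exact hR1R ▸ hcl2 k' h1 (hR1R ▸ hk'R) y hy
        · intro hch hch'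
          cases hn : n1.isEmpty
          · intro hcontra
            have : n1 = [] := (List.append_eq_nil_iff.mp hcontra).1
            rw [this] at hn; simp at hn
          · have hn1 : n1 = [] := List.isEmpty_iff.mp hn
            have hch1f : ch1 = false := by rw [hch1, hch, hn1]; rfl
            have := hstr hch1f hch'
            intro hcontra
            exact this (List.append_eq_nil_iff.mp hcontra).2
    · rw [if_neg hk] at h
      have hkR : k ∉ R := fun hm => hk ((PySem.Set.contains_iff R k).mpr hm)
      obtain ⟨news, hR, hf, hfix, hstr⟩ := ih _ _ _ _ h
      refine ⟨news, hR, hf, ?_, hstr⟩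
      intro hch'
      obtain ⟨hn, hc, hcl⟩ := hfix hch'
      refine ⟨hn, hc, ?_⟩
      intro k' hk' hk'R y hy
      rcases List.mem_cons.mp hk' with h1 | h1
      · exact absurd (h1 ▸ hk'R) hkR
      · exact hcl k' h1 hk'R y hy

lemma pvPass_sound (d : PySem.Dict Int (List Int)) (P : Int → Prop)
    (hcl : ∀ v, P v → ∀ y ∈ pvNb d v, P y) :
    ∀ (ks : List Int) (R : PySem.Set Int) (ch : Bool),
      (∀ x ∈ R, P x) → ∀ x ∈ (pvPass d ks R ch).1, P x := by
  intro ks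
  induction ks with
  | nil => intro R ch hR x hx; exact hR x hx
  | cons k ks ih =>
    intro R ch hR x hx
    simp only [pvPass] at hx
    by_cases hk : PySem.Set.contains R k = true
    · rw [if_pos hk] at hx
      have hkR : k ∈ R := (PySem.Set.contains_iff R k).mp hk
      cases hgrow : pvGrow (d.getD k []) R ch with
      | mk R1 ch1 =>
        rw [hgrow] at hx; dsimp only at hx
        obtain ⟨n1, hR1, hf1, _, _⟩ := pvGrow_spec _ _ _ _ _ hgrow
        refine ih R1 ch1 ?_ x hx
        intro y hy
        rw [hR1] at hy
        rcases List.mem_append.mp hy with h1 | h1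
        · exact hR y h1
        · exact hcl k (hR k hkR) y (hf1 y h1).1
    · rw [if_neg hk] at hx
      exact ih R ch hR x hx

lemma pvSaturate_mono_closed (d : PySem.Dict Int (List Int)) (ks : List Int) :
    ∀ (fuel : Nat) (R : PySem.Set Int),
      (pvU d \ R.toFinset).card < fuel →
      (∀ x ∈ R, x ∈ pvSaturate d ks fuel R) ∧
      (∀ k ∈ ks, k ∈ pvSaturate d ks fuel R →
        ∀ y ∈ pvNb d k, y ∈ pvSaturate d ks fuel R) := by
  intro fuel
  induction fuel with
  | zero => intro R hf; omega
  | succ n ih =>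
    intro R hf
    rw [pvSaturate]
    cases hpass : pvPass d ks R false with
    | mk R1 ch =>
      dsimp only
      obtain ⟨news, hR1, hfresh, hfix, hstr⟩ := pvPass_spec d _ _ _ _ _ hpass
      cases hch : ch
      · rw [if_neg (by simp)]
        obtain ⟨hn, _, hcl⟩ := hfix hch
        have hRR : R1 = R := by rw [hR1, hn, List.append_nil]
        subst hRR
        exact ⟨fun x hx => hx, fun k hk hkR y hy => hcl k hk hkR y hy⟩
      · rw [if_pos (by simp)]
        have hne : news ≠ [] := hstr rfl hch
        obtain ⟨x, hx⟩ := List.exists_mem_of_ne_nil news hne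
        obtain ⟨hxU, hxR⟩ := hfresh x hx
        have hsub : pvU d \ R1.toFinset ⊂ pvU d \ R.toFinset := by
          constructor
          · intro a ha
            rw [Finset.mem_sdiff] at ha ⊢
            refine ⟨ha.1, fun hm => ha.2 ?_⟩
            rw [hR1]
            simp only [List.toFinset_append, Finset.mem_union]
            exact Or.inl hm
          · intro hcontra
            have hx1 : x ∈ pvU d \ R.toFinset :=
              Finset.mem_sdiff.mpr ⟨hxU, fun hm => hxR (List.mem_toFinset.mp hm)⟩
            have := hcontra hx1
            rw [Finset.mem_sdiff] at this
            exact this.2 (by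
              rw [hR1]
              simp only [List.toFinset_append, Finset.mem_union]
              exact Or.inr (List.mem_toFinset.mpr hx))
        have hf' : (pvU d \ R1.toFinset).card < n := by
          have := Finset.card_lt_card hsub
          omega
        obtain ⟨hmono, hcl⟩ := ih R1 hf'
        refine ⟨fun z hz => hmono z (by rw [hR1]; exact List.mem_append_left _ hz), hcl⟩

lemma pvSaturate_sound (d : PySem.Dict Int (List Int)) (ks : List Int) (P : Int → Prop)
    (hcl : ∀ v, P v → ∀ y ∈ pvNb d v, P y) :
    ∀ (fuel : Nat) (R : PySem.Set Int),
      (∀ x ∈ R, P x) → ∀ x ∈ pvSaturate d ks fuel R, P x := by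
  intro fuel
  induction fuel with
  | zero => intro R hR x hx; exact hR x hx
  | succ n ih =>
    intro R hR x hx
    rw [pvSaturate] at hx
    cases hpass : pvPass d ks R false with
    | mk R1 ch =>
      rw [hpass] at hx; dsimp only at hx
      have hR1 : ∀ y ∈ R1, P y := by
        intro y hy
        have := pvPass_sound d P hcl ks R false hR
        rw [hpass] at this
        exact this y hy
      cases hch : ch
      · rw [hch] at hx; rw [if_neg (by simp)] at hx
        exact hR1 x hx
      · rw [hch] at hx; rw [if_pos (by simp)] at hx
        exact ih R1 hR1 x hx

lemma pvAnyEnd_iff (d : PySem.Dict Int (List Int)) (e_ : Int) (R : PySem.Set Int) :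
    ∀ ks : List Int,
      pvAnyEnd d e_ R ks = true ↔ ∃ k ∈ ks, k ∈ R ∧ e_ ∈ pvNb d k := by
  intro ks
  induction ks with
  | nil => simp [pvAnyEnd]
  | cons k ks ih =>
    simp only [pvAnyEnd]
    by_cases hk : (PySem.Set.contains R k && (d.getD k []).contains e_) = true
    · rw [if_pos hk]
      obtain ⟨h1, h2⟩ := Bool.and_eq_true_iff.mp hk
      simp only [true_iff]
      exact ⟨k, List.mem_cons_self .., (PySem.Set.contains_iff R k).mp h1,
        by unfold pvNb; exact List.mem_of_elem_eq_true h2⟩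
    · rw [if_neg hk, ih]
      constructor
      · rintro ⟨k', hk', hkR, hke⟩
        exact ⟨k', List.mem_cons_of_mem _ hk', hkR, hke⟩
      · rintro ⟨k', hk', hkR, hke⟩
        rcases List.mem_cons.mp hk' with h1 | h1
        · subst h1
          exfalso
          apply hk
          rw [Bool.and_eq_true_iff]
          exact ⟨(PySem.Set.contains_iff R k').mpr hkR,
            List.elem_eq_true_of_mem hke⟩
        · exact ⟨k', h1, hkR, hke⟩

-- a node with a non-empty neighbour list is a key, hence among the deduped keys B iterates
lemma pv_mem_keysB (adj : List (Int × List Int)) (v : Int)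
    (h : pvNb (PySem.Dict.mk adj) v ≠ []) : v ∈ pvKeysB adj := by
  unfold pvNb at h
  cases hget : (PySem.Dict.mk adj).get? v with
  | none =>
    exact absurd (PySem.Dict.getD_of_get?_eq_none _ _ hget) h
  | some l =>
    have hkeys : v ∈ (PySem.Dict.mk adj).keys := by
      by_contra hnk
      rw [(PySem.Dict.get?_eq_none_iff_not_mem_keys ..).mpr hnk] at hget
      cases hget
    unfold pvKeysB
    rw [PySem.List.dedup_eq_ofList, PySem.Set.mem_ofList]
    simpa [PySem.Dict.keys] using hkeys

lemma pvB_iff (adj : List (Int × List Int)) (start e_ : Int) :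
    bfs_path_exists_alt adj start e_ = true ↔
      (start = e_ ∨ pvHit (PySem.Dict.mk adj) start e_) := by
  unfold bfs_path_exists_alt
  by_cases hse : start = e_
  · simp [hse]
  · rw [if_neg (by simpa using hse)]
    have hstart : start ∈ PySem.Set.ofList [start] := by
      rw [PySem.Set.mem_ofList]; exact List.mem_cons_self ..
    have honly : ∀ v, v ∈ PySem.Set.ofList [start] → v = start := by
      intro v hv
      rw [PySem.Set.mem_ofList] at hv
      simpa using hv
    have hfuel : (pvU (PySem.Dict.mk adj) \ (PySem.Set.ofList [start]).toFinset).card <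
        pvFuelB adj := by
      have h2 : (pvU (PySem.Dict.mk adj) \ (PySem.Set.ofList [start]).toFinset).card ≤
          ((PySem.Dict.mk adj).items.flatMap (fun p => p.2)).length := by
        calc _ ≤ (pvU (PySem.Dict.mk adj)).card := Finset.card_le_card (Finset.sdiff_subset)
          _ ≤ _ := List.toFinset_card_le _
      have hit : (PySem.Dict.mk adj).items = adj := rfl
      rw [hit] at h2
      unfold pvFuelB
      omega
    obtain ⟨hmono, hcl⟩ := pvSaturate_mono_closed (PySem.Dict.mk adj) (pvKeysB adj)
      (pvFuelB adj) (PySem.Set.ofList [start]) hfuel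
    rw [pvAnyEnd_iff]
    constructor
    · rintro ⟨k, _, hkR, hke⟩
      have hsound := pvSaturate_sound (PySem.Dict.mk adj) (pvKeysB adj)
        (fun x => Relation.ReflTransGen (pvEdge (PySem.Dict.mk adj)) start x)
        (fun v hv y hy => Relation.ReflTransGen.tail hv hy)
        (pvFuelB adj) (PySem.Set.ofList [start])
        (fun x hx => (honly x hx) ▸ Relation.ReflTransGen.refl)
      exact Or.inr ⟨k, hsound k hkR, hke⟩
    · rintro (h | ⟨w, hr, he⟩)
      · exact absurd h hse
      · -- the saturated set contains every node reachable from start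
        have hclosed : ∀ v, v ∈ pvSaturate (PySem.Dict.mk adj) (pvKeysB adj)
            (pvFuelB adj) (PySem.Set.ofList [start]) →
            ∀ y ∈ pvNb (PySem.Dict.mk adj) v,
              y ∈ pvSaturate (PySem.Dict.mk adj) (pvKeysB adj)
                (pvFuelB adj) (PySem.Set.ofList [start]) := by
          intro v hv y hy
          have hne : pvNb (PySem.Dict.mk adj) v ≠ [] := fun hnil => by
            rw [hnil] at hy; cases hy
          exact hcl v (pv_mem_keysB adj v hne) hv y hy
        have hw := pv_reach_closed (PySem.Dict.mk adj) _ hclosed (hmono start hstart) hr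
        have hwk : w ∈ pvKeysB adj :=
          pv_mem_keysB adj w (fun hnil => by rw [hnil] at he; cases he)
        exact ⟨w, hwk, hw, he⟩

-- ===== VERDICT (by name: the statement is the Claim_ definition above) =====
theorem bfs_path_exists_spec : Claim_equal_bfs_path_exists := by
  intro adj start end_ _
  unfold Spec_bfs_path_exists
  apply Bool.coe_iff_coe.mp
  rw [pvA_iff, pvB_iff]
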